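-- pv_equiv track=rewrite | github.com/Saifa36622/fibo-python | LoopAterMidTerm.py | LoopAfterMidTerm
-- ===== SOURCE A (Python) =====
-- def LoopAfterMidTerm(n):
--     x = 1
--     st = []
--     total = ""
--     y = []
--     z = 1
--     if n == 0 :
--         return 0
--     while x <= n :
--         y.append(x)
--         y_re = y[::-1]
--         if z % 2 == 0 :
--             st.append("".join(map(str,y_re)))
--             st.append("".join(map(str,y)))
--         else:
--             st.append("".join(map(str,y)))
--             st.append("".join(map(str,y_re)))
--         x = x+1
--         z = z+1
--     total += "".join(map(str,st))
--     return (total)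
-- ===== SOURCE B (Python) =====
-- def LoopAfterMidTerm(n):
--     if n == 0:
--         return 0
--     parts = [str(i) for i in range(1, n + 1)]
--     full = "".join(parts)
--     rev_full = "".join(parts[::-1])
--     L = len(full)
--     out = []
--     end = 0
--     for x in range(1, n + 1):
--         end += len(parts[x - 1])
--         fwd = full[:end]
--         rev = rev_full[L - end:]
--         if x % 2 == 1:
--             out.append(fwd)
--             out.append(rev)
--         else:
--             out.append(rev)
--             out.append(fwd)
--     return "".join(out)
-- ===== Notes on version B (the rewrite author's own statement) =====
-- stated objective: faster
-- what changed: Instead of rebuilding the growing list, reversing it and re-stringifying every number on every iteration, B converts each number to a string once, precomputes the full ascending and descending master strings, and obtains each forward/backward run as a prefix of the ascending string and a suffix of the descending string via cumulative digit offsets, joining all pieces once at the end.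
-- outside the precondition, e.g. on LoopAfterMidTerm(0): A returns 0, B returns 0
import Mathlib
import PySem

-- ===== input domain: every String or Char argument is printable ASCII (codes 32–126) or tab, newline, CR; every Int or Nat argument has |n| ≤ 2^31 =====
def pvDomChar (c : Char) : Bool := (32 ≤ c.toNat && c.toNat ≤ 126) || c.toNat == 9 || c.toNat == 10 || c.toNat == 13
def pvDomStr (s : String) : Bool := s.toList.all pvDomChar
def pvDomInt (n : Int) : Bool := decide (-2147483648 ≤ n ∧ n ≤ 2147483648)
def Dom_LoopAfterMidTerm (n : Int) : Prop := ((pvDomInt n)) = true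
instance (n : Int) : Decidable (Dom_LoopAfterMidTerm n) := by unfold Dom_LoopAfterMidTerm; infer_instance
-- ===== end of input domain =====

-- B replaces A's per-iteration list rebuild / reversal / re-stringification by one-time
-- str() conversion plus prefix/suffix slices of two precomputed master strings (objective: faster).

-- ===== PORT A =====
-- "".join(map(str, ys))
def pvJoinA (ys : List Int) : String := PySem.Str.join "" (ys.map PySem.Int.toStr)

-- the while-loop of A: state (x, z, y, st); fuel = number of remaining iterations
def pvLoopA : Nat → Int → Int → List Int → List String → List String
  | 0, _, _, _, st => st
  | k+1, x, z, y, st =>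
    let y' := y ++ [x]                         -- y.append(x)
    let yRe := y'.reverse                      -- y[::-1]  (PySem.List.slice?_none_none_neg_one)
    let st' := if PySem.Int.mod z 2 == 0
      then st ++ [pvJoinA yRe, pvJoinA y']
      else st ++ [pvJoinA y', pvJoinA yRe]
    pvLoopA k (x+1) (z+1) y' st'

def LoopAfterMidTerm (n : Int) : String :=
  if n == 0 then ""   -- Python returns the INT 0 here (not a str); excluded by Pre_
  else "" ++ PySem.Str.join "" (pvLoopA n.toNat 1 1 [] [])   -- total = ""; total += "".join(map(str, st))

-- ===== PORT B =====
-- the for-loop of B: remaining xs, cumulative digit offset e, collected pieces out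
def pvLoopB (parts : List String) (full revFull : String) (L : Int) :
    List Int → Int → List String → List String
  | [], _, out => out
  | x :: xs, e, out =>
    let e' := e + PySem.Str.len (PySem.List.pyGetD parts (x - 1) "")  -- end += len(parts[x-1])
    let fwd := PySem.Str.slice full none (some e')                    -- full[:end]
    let rev := PySem.Str.slice revFull (some (L - e')) none           -- rev_full[L-end:]
    let out' := if PySem.Int.mod x 2 == 1 then out ++ [fwd, rev] else out ++ [rev, fwd]
    pvLoopB parts full revFull L xs e' out'

def LoopAfterMidTerm_alt (n : Int) : String :=
  if n == 0 then ""   -- Python B returns the int 0 here too; excluded by Pre_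
  else
    let parts := (PySem.List.pyRange 1 (n+1) 1).map PySem.Int.toStr
    let full := PySem.Str.join "" parts
    let revFull := PySem.Str.join "" parts.reverse   -- parts[::-1] (PySem.List.slice?_none_none_neg_one)
    let L := PySem.Str.len full
    PySem.Str.join "" (pvLoopB parts full revFull L (PySem.List.pyRange 1 (n+1) 1) 0 [])

-- ===== PRECONDITION & SPEC =====
-- Pre_ excludes only n = 0, where Python A returns the INT 0 — not a value of the declared str type.
def Pre_LoopAfterMidTerm (n : Int) : Prop := n ≠ 0
instance (n : Int) : Decidable (Pre_LoopAfterMidTerm n) := by unfold Pre_LoopAfterMidTerm; infer_instance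
def pvWitness_LoopAfterMidTerm : Int := 3

def Spec_LoopAfterMidTerm (n : Int) (out : String) : Prop := out = LoopAfterMidTerm_alt n
instance (n : Int) (out : String) : Decidable (Spec_LoopAfterMidTerm n out) := by unfold Spec_LoopAfterMidTerm; infer_instance

-- ===== CLAIM (what is proved, stated in full; the proofs are below) =====
def Claim_equal_LoopAfterMidTerm : Prop := ∀ (n : Int), Dom_LoopAfterMidTerm n → Pre_LoopAfterMidTerm n → Spec_LoopAfterMidTerm n (LoopAfterMidTerm n)

-- ===== LEMMAS AND PROOFS =====

-- canonical description shared by both proofs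
def iUp (k : Nat) : List Int := List.map (fun (i : Nat) => (i : Int) + 1) (List.range k)
def chF (j : Nat) : List Char := ((iUp j).map (fun v => (PySem.Int.toStr v).toList)).flatten
def chR (j : Nat) : List Char := (((iUp j).reverse).map (fun v => (PySem.Int.toStr v).toList)).flatten
def pcs : Nat → Nat → List String
  | _, 0 => []
  | m, k+1 =>
      (if (m+1) % 2 == 0 then [String.ofList (chR (m+1)), String.ofList (chF (m+1))]
       else [String.ofList (chF (m+1)), String.ofList (chR (m+1))]) ++ pcs (m+1) k

lemma join_empty_sep (l : List (List Char)) : PySem.Chars.join [] l = l.flatten := by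
  induction l with
  | nil => simp [PySem.Chars.join_nil]
  | cons a t ih =>
    cases t with
    | nil => simp [PySem.Chars.join_singleton]
    | cons b r => rw [PySem.Chars.join_cons_cons]; simp_all

lemma toList_join0 (l : List String) :
    (PySem.Str.join "" l).toList = (l.map String.toList).flatten := by
  rw [PySem.Str.toList_join]
  have : ("" : String).toList = [] := rfl
  rw [this, join_empty_sep]

lemma iUp_succ (k : Nat) : iUp (k+1) = iUp k ++ [(k : Int) + 1] := by
  simp [iUp, List.range_succ]

lemma pvJoinA_eq (ys : List Int) :
    pvJoinA ys = String.ofList ((ys.map (fun v => (PySem.Int.toStr v).toList)).flatten) := by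
  apply String.toList_inj.mp
  rw [pvJoinA, toList_join0, String.toList_ofList, List.map_map]
  rfl

lemma chF_succ (m : Nat) : chF (m+1) = chF m ++ (PySem.Int.toStr ((m : Int) + 1)).toList := by
  simp [chF, iUp_succ]

lemma loopA_inv (k : Nat) : ∀ (m : Nat) (st : List String),
    pvLoopA k ((m : Int) + 1) ((m : Int) + 1) (iUp m) st = st ++ pcs m k := by
  induction k with
  | zero => intro m st; simp [pvLoopA, pcs]
  | succ k ih =>
    intro m st
    show pvLoopA (k+1) ((m : Int) + 1) ((m : Int) + 1) (iUp m) st = st ++ pcs m (k+1)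
    rw [pvLoopA]
    have hy : iUp m ++ [(m : Int) + 1] = iUp (m+1) := (iUp_succ m).symm
    have hmod : PySem.Int.mod ((m : Int) + 1) 2 = (((m+1) % 2 : Nat) : Int) := by
      have := PySem.Int.mod_natCast (m+1) 2
      push_cast at this ⊢
      exact_mod_cast this
    have hx : (m : Int) + 1 + 1 = ((m+1 : Nat) : Int) + 1 := by push_cast; ring
    simp only [hy, hmod, hx]
    rw [ih (m+1)]
    have hpc : pcs m (k+1) =
        (if (m+1) % 2 == 0 then [String.ofList (chR (m+1)), String.ofList (chF (m+1))]
         else [String.ofList (chF (m+1)), String.ofList (chR (m+1))]) ++ pcs (m+1) k := rfl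
    have hF : pvJoinA (iUp (m+1)) = String.ofList (chF (m+1)) := by rw [pvJoinA_eq]; rfl
    have hR : pvJoinA ((iUp (m+1)).reverse) = String.ofList (chR (m+1)) := by
      rw [pvJoinA_eq]; rfl
    rw [hF, hR, hpc]
    have hcond : ((((m+1) % 2 : Nat) : Int) == 0) = ((m+1) % 2 == 0) := by
      rcases Nat.mod_two_eq_zero_or_one (m+1) with h | h <;> simp [h]
    rw [hcond]
    split <;> simp

lemma A_eq (n : Int) (hn : n ≠ 0) :
    LoopAfterMidTerm n = PySem.Str.join "" (pcs 0 n.toNat) := by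
  rw [LoopAfterMidTerm]
  have h0 : (n == 0) = false := by simp [hn]
  rw [h0]
  have := loopA_inv n.toNat 0 []
  simp only [Nat.cast_zero, zero_add] at this
  have hi : iUp 0 = [] := rfl
  rw [hi] at this
  simp only [Bool.false_eq_true, this, List.nil_append]
  apply String.toList_inj.mp
  simp

-- B-side facts
lemma pyRange_eq_iUp (n : Int) : PySem.List.pyRange 1 (n+1) 1 = iUp n.toNat := by
  rw [PySem.List.pyRange_one]
  have h : (n + 1 - 1).toNat = n.toNat := by omega
  rw [h]
  unfold iUp
  apply List.map_congr_left
  intro a _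
  ring

lemma iUp_take (N j : Nat) (h : j ≤ N) : (iUp N).take j = iUp j := by
  rw [iUp, iUp, ← List.map_take, List.take_range, Nat.min_eq_left h]

lemma iUp_split (N j : Nat) (h : j ≤ N) : iUp N = iUp j ++ (iUp N).drop j := by
  conv_lhs => rw [← List.take_append_drop j (iUp N)]
  rw [iUp_take N j h]

lemma chF_split (N j : Nat) (h : j ≤ N) :
    chF N = chF j ++ (((iUp N).drop j).map (fun v => (PySem.Int.toStr v).toList)).flatten := by
  conv_lhs => rw [chF, iUp_split N j h]
  rw [List.map_append, List.flatten_append, ← chF]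

lemma chR_split (N j : Nat) (h : j ≤ N) :
    chR N = ((((iUp N).drop j).reverse).map (fun v => (PySem.Int.toStr v).toList)).flatten ++ chR j := by
  rw [chR]
  conv_lhs => rw [iUp_split N j h]
  rw [List.reverse_append, List.map_append, List.flatten_append, ← chR]

lemma chR_length (j : Nat) : (chR j).length = (chF j).length := by
  rw [chR, chF, List.map_reverse, List.length_flatten, List.length_flatten,
      List.map_reverse, List.sum_reverse]

lemma iUp_drop_cons (N m : Nat) (h : m < N) :
    (iUp N).drop m = ((m : Int) + 1) :: (iUp N).drop (m+1) := by
  have hlen : m < (iUp N).length := by simpa [iUp] using h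
  rw [List.drop_eq_getElem_cons hlen]
  simp [iUp]

lemma iUp_getD (N m : Nat) (h : m < N) :
    ((iUp N).map PySem.Int.toStr).getD m "" = PySem.Int.toStr ((m : Int) + 1) := by
  have hlen : m < ((iUp N).map PySem.Int.toStr).length := by simpa [iUp] using h
  rw [List.getD_eq_getElem _ _ hlen]
  simp [iUp]

lemma loopB_inv (N : Nat) (parts : List String) (full revFull : String) (L : Int)
    (hp : parts = (iUp N).map PySem.Int.toStr)
    (hf : full.toList = chF N) (hr : revFull.toList = chR N)
    (hL : L = ((chF N).length : Int)) :
    ∀ (k m : Nat) (out : List String), m + k = N →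
      pvLoopB parts full revFull L ((iUp N).drop m) (((chF m).length : Nat) : Int) out
        = out ++ pcs m k := by
  intro k
  induction k with
  | zero =>
    intro m out hmk
    have : (iUp N).drop m = [] := by
      apply List.drop_eq_nil_of_le
      simp [iUp]; omega
    rw [this, pvLoopB, pcs]
    simp
  | succ k ih =>
    intro m out hmk
    have hmN : m < N := by omega
    rw [iUp_drop_cons N m hmN, pvLoopB]
    -- the element fetched from parts
    have hget : PySem.List.pyGetD parts ((m : Int) + 1 - 1) "" = PySem.Int.toStr ((m : Int) + 1) := by
      have : (m : Int) + 1 - 1 = ((m : Nat) : Int) := by ring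
      rw [this, PySem.List.pyGetD_natCast, hp, iUp_getD N m hmN]
    -- the new offset is the length of chF (m+1)
    have he' : (((chF m).length : Nat) : Int) + PySem.Str.len (PySem.List.pyGetD parts ((m : Int) + 1 - 1) "")
        = (((chF (m+1)).length : Nat) : Int) := by
      rw [hget, PySem.Str.len_eq, chF_succ]
      push_cast [List.length_append]
      ring
    rw [he']
    -- forward piece: a prefix of full
    have hfwd : PySem.Str.slice full none (some (((chF (m+1)).length : Nat) : Int))
        = String.ofList (chF (m+1)) := by
      apply String.toList_inj.mp
      rw [PySem.Str.toList_slice, String.toList_ofList]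
      rw [PySem.Chars.slice_eq_listSlice, PySem.List.slice_to_natCast, hf,
          chF_split N (m+1) hmN]
      exact List.take_left
    -- reverse piece: a suffix of revFull
    have hrev : PySem.Str.slice revFull (some (L - (((chF (m+1)).length : Nat) : Int))) none
        = String.ofList (chR (m+1)) := by
      have hle : (chF (m+1)).length ≤ (chF N).length := by
        rw [chF_split N (m+1) hmN]; simp
      have hdiff : L - (((chF (m+1)).length : Nat) : Int)
          = (((chF N).length - (chF (m+1)).length : Nat) : Int) := by
        rw [hL]; omega
      apply String.toList_inj.mp
      rw [PySem.Str.toList_slice, String.toList_ofList, hdiff]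
      rw [PySem.Chars.slice_eq_listSlice, PySem.List.slice_from_natCast, hr,
          chR_split N (m+1) hmN]
      have hxlen : (((((iUp N).drop (m+1)).reverse).map (fun v => (PySem.Int.toStr v).toList)).flatten).length
          = (chF N).length - (chF (m+1)).length := by
        have := chR_split N (m+1) hmN
        have hlen := congrArg List.length this
        rw [List.length_append, chR_length, chR_length] at hlen
        omega
      rw [← hxlen]
      exact List.drop_left
    rw [hfwd, hrev]
    -- parity of the branch
    have hmod : PySem.Int.mod ((m : Int) + 1) 2 = (((m+1) % 2 : Nat) : Int) := by
      have := PySem.Int.mod_natCast (m+1) 2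
      push_cast at this ⊢
      exact_mod_cast this
    have hcondB : (PySem.Int.mod ((m : Int) + 1) 2 == 1) = !((m+1) % 2 == 0) := by
      rw [hmod]
      rcases Nat.mod_two_eq_zero_or_one (m+1) with h | h <;> simp [h]
    rw [hcondB, ih (m+1) _ (by omega)]
    have hpc : pcs m (k+1) =
        (if (m+1) % 2 == 0 then [String.ofList (chR (m+1)), String.ofList (chF (m+1))]
         else [String.ofList (chF (m+1)), String.ofList (chR (m+1))]) ++ pcs (m+1) k := rfl
    rw [hpc]
    cases h : ((m+1) % 2 == 0) <;> simp

lemma B_eq (n : Int) (hn : n ≠ 0) :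
    LoopAfterMidTerm_alt n = PySem.Str.join "" (pcs 0 n.toNat) := by
  rw [LoopAfterMidTerm_alt]
  have h0 : (n == 0) = false := by simp [hn]
  rw [h0]
  simp only [Bool.false_eq_true]
  rw [pyRange_eq_iUp]
  have hp : (iUp n.toNat).map PySem.Int.toStr = (iUp n.toNat).map PySem.Int.toStr := rfl
  have hf : (PySem.Str.join "" ((iUp n.toNat).map PySem.Int.toStr)).toList = chF n.toNat := by
    rw [toList_join0, List.map_map]; rfl
  have hr : (PySem.Str.join "" (((iUp n.toNat).map PySem.Int.toStr).reverse)).toList = chR n.toNat := by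
    rw [toList_join0, ← List.map_reverse, List.map_map]; rfl
  have hL : PySem.Str.len (PySem.Str.join "" ((iUp n.toNat).map PySem.Int.toStr))
      = ((chF n.toNat).length : Int) := by
    rw [PySem.Str.len_eq, hf]
  have h := loopB_inv n.toNat _ _ _ _ hp hf hr hL n.toNat 0 [] (by omega)
  have hd : (iUp n.toNat).drop 0 = iUp n.toNat := List.drop_zero
  have hc0 : (((chF 0).length : Nat) : Int) = 0 := rfl
  rw [hd, hc0] at h
  rw [hL] at h
  rw [hL, h]
  simp

-- ===== VERDICT (by name: the statement is the Claim_ definition above) =====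
theorem LoopAfterMidTerm_spec : Claim_equal_LoopAfterMidTerm := by
  intro n _ hpre
  unfold Spec_LoopAfterMidTerm
  rw [A_eq n hpre, B_eq n hpre]
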